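-- pv_equiv track=rewrite | github.com/iamanandkris/wrkflw | scripts/generate_workflow_diagram.py | story_touch_order
-- ===== SOURCE A (Python) =====
-- def story_touch_order(events: list[dict[str, str]], stories: list[dict[str, str]]) -> list[str]:
--     story_names = {story["name"] for story in stories}
--     order: list[str] = []
--     seen: set[str] = set()
--     for event in events:
--         for item in [value.strip() for value in event.get("Focus items", "").split(",") if value.strip()]:
--             if item in story_names and item not in seen:
--                 seen.add(item)
--                 order.append(item)
--     return order
-- ===== SOURCE B (Python) =====
-- def story_touch_order(events: list[dict[str, str]], stories: list[dict[str, str]]) -> list[str]: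
--     tokens = [value.strip()
--               for event in events
--               for value in event.get("Focus items", "").split(",")
--               if value.strip()]
--     names = {story["name"] for story in stories}
--     return sorted((n for n in names if n in tokens), key=tokens.index)
-- ===== Notes on version B (the rewrite author's own statement) =====
-- stated objective: alternative
-- what changed: Instead of A's single pass that appends unseen matching items while maintaining a seen-set, B gathers the flat token stream once and then sorts the present story names by their first-occurrence index (tokens.index) -- order is recovered by sorting on a key, with no seen-set and no incremental output list.
import Mathlib
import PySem

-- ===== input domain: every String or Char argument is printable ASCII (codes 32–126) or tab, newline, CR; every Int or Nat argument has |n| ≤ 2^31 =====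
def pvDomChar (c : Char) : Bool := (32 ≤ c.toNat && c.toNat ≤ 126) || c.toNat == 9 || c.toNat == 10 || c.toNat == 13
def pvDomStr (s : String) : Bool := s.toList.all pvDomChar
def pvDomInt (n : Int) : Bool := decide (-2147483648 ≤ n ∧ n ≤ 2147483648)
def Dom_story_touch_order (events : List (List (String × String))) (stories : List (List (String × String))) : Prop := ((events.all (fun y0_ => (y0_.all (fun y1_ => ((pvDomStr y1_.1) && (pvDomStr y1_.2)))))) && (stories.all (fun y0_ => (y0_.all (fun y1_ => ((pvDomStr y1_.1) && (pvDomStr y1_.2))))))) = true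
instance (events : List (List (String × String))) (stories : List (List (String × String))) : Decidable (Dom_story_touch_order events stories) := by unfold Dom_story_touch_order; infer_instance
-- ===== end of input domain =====

-- B recovers first-occurrence order by SORTING the present story names by their first index in the flat
-- token stream, instead of A's incremental pass with a seen-set; alternative algorithm, same result.

-- ===== PORT A =====
-- A's single pass: fold over events, inner fold over stripped nonempty focus items, state = (order, seen)
def story_touch_order (events : List (List (String × String))) (stories : List (List (String × String))) : List String :=
  let story_names : PySem.Set String :=
    PySem.Set.ofList (stories.map (fun story => (PySem.Dict.mk story).getD "name" ""))
  let res : List String × PySem.Set String :=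
    events.foldl (fun st event =>
      ((((PySem.Dict.mk event).getD "Focus items" "" |>.splitOn ",").map PySem.Str.strip).filter
          (fun v => v ≠ "")).foldl
        (fun st item =>
          if PySem.Set.contains story_names item && !(PySem.Set.contains st.2 item) then
            (st.1 ++ [item], PySem.Set.add st.2 item)
          else st) st)
      ([], PySem.Set.empty)
  res.1

-- ===== PORT B =====
-- B: flat token stream, then sort the story names present in it by tokens.index.
-- tokens.index n is only evaluated on names n with n ∈ tokens (the generator filters first), where
-- PySem.List.index? is some; the .getD 0 is exact there. The key is injective on those names (distinct
-- names have distinct first indices), so sorting the set's elements is order-independent.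
def story_touch_order_alt (events : List (List (String × String))) (stories : List (List (String × String))) : List String :=
  let tokens : List String :=
    events.flatMap (fun event =>
      (((PySem.Dict.mk event).getD "Focus items" "" |>.splitOn ",").map PySem.Str.strip).filter
        (fun v => v ≠ ""))
  let names : PySem.Set String :=
    PySem.Set.ofList (stories.map (fun story => (PySem.Dict.mk story).getD "name" ""))
  PySem.List.sorted (names.filter (fun n => tokens.contains n))
    (fun n => (PySem.List.index? tokens n).getD 0) false

-- ===== PRECONDITION & SPEC =====
-- A (and B) raise KeyError on story["name"] when some story dict lacks the key "name"; Pre_ excludes exactly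
-- those inputs (the ports use getD with a dummy default there, outside the claim).
def Pre_story_touch_order (events : List (List (String × String))) (stories : List (List (String × String))) : Prop :=
  ∀ story ∈ stories, (PySem.Dict.mk story).contains "name" = true
instance (events : List (List (String × String))) (stories : List (List (String × String))) : Decidable (Pre_story_touch_order events stories) := by unfold Pre_story_touch_order; infer_instance
def pvWitness_story_touch_order : (List (List (String × String))) × (List (List (String × String))) :=
  ([[("Focus items", "b, a ,b,a")]], [[("name", "a")], [("name", "b")]])
def Spec_story_touch_order (events : List (List (String × String))) (stories : List (List (String × String))) (out : List String) : Prop := out = story_touch_order_alt events stories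
instance (events : List (List (String × String))) (stories : List (List (String × String))) (out : List String) : Decidable (Spec_story_touch_order events stories out) := by unfold Spec_story_touch_order; infer_instance

-- ===== CLAIM (what is proved, stated in full; the proofs are below) =====
def Claim_equal_story_touch_order : Prop := ∀ (events : List (List (String × String))) (stories : List (List (String × String))), Dom_story_touch_order events stories → Pre_story_touch_order events stories → Spec_story_touch_order events stories (story_touch_order events stories)

-- ===== LEMMAS AND PROOFS =====

-- A's inner-loop step, with membership test P, on the paired (order, seen) state.
def stepA (P : String → Bool) (st : List String × PySem.Set String) (item : String) :
    List String × PySem.Set String :=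
  if P item && !(PySem.Set.contains st.2 item) then (st.1 ++ [item], PySem.Set.add st.2 item) else st

-- On a diagonal state (s, s), A's filtered step-fold is Set.add-folding the P-filtered list.
theorem stepA_diag (P : String → Bool) (l : List String) (s : PySem.Set String) :
    l.foldl (stepA P) (s, s) = ((l.filter P).foldl PySem.Set.add s, (l.filter P).foldl PySem.Set.add s) := by
  induction l generalizing s with
  | nil => rfl
  | cons x xs ih =>
    simp only [List.foldl_cons, List.filter_cons]
    by_cases hP : P x = true
    · have hs : stepA P (s, s) x = (PySem.Set.add s x, PySem.Set.add s x) := by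
        by_cases hm : x ∈ s
        · simp [stepA, PySem.Set.add, hP, hm]
        · simp [stepA, PySem.Set.add, hP, hm]
      rw [hs, ih]
      simp [hP]
    · have hs : stepA P (s, s) x = (s, s) := by
        simp only [Bool.not_eq_true] at hP
        simp [stepA, hP]
      rw [hs, ih]
      simp only [Bool.not_eq_true] at hP
      simp [hP]

theorem set_add_cons_of_ne (x y : String) (s : List String) (hy : y ≠ x) :
    PySem.Set.add (x :: s) y = x :: PySem.Set.add s y := by
  by_cases hm : y ∈ s
  · simp [PySem.Set.add, PySem.Set.contains, hy, hm]
  · simp [PySem.Set.add, PySem.Set.contains, hy, hm]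

-- prepending x to the accumulating set makes Set.add skip exactly the copies of x
theorem foldl_add_cons (x : String) :
    ∀ (t : List String) (s : List String),
      t.foldl PySem.Set.add (x :: s) = x :: (t.filter (fun y => !(y == x))).foldl PySem.Set.add s := by
  intro t
  induction t with
  | nil => intro s; rfl
  | cons y ys ih =>
    intro s
    by_cases hy : y = x
    · subst hy
      have h1 : PySem.Set.add (y :: s) y = y :: s := by
        simp [PySem.Set.add, PySem.Set.contains]
      simp only [List.foldl_cons, h1, List.filter_cons, beq_self_eq_true, Bool.not_true]
      exact ih s
    · have hb : (y == x) = false := by simp [hy]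
      simp only [List.foldl_cons, set_add_cons_of_ne x y s hy, List.filter_cons, hb,
        Bool.not_false, if_pos]
      exact ih (PySem.Set.add s y)

theorem dedup_cons (x : String) (l : List String) :
    PySem.List.dedup (x :: l) = x :: PySem.List.dedup (l.filter (fun y => !(y == x))) := by
  have h0 : PySem.Set.add ([] : List String) x = [x] := rfl
  simp only [PySem.List.dedup_eq_ofList, PySem.Set.ofList_eq_foldl, List.foldl_cons, h0]
  exact foldl_add_cons x l []

theorem mem_dedup_filter {P : String → Bool} {l : List String} {a : String}
    (h : a ∈ PySem.List.dedup (l.filter P)) : a ∈ l ∧ P a = true := by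
  rw [PySem.List.mem_dedup] at h
  exact ⟨(List.mem_filter.mp h).1, (List.mem_filter.mp h).2⟩

theorem index?_some_of_mem {l : List String} {v : String} (h : v ∈ l) :
    ∃ k, PySem.List.index? l v = some k := by
  have h1 : (PySem.List.index? l v).isSome := by
    rw [PySem.List.index?_isSome_iff]; exact h
  exact Option.isSome_iff_exists.mp h1

-- dedup of the P-filtered list is strictly increasing in first-occurrence index of the base list
theorem pairwise_idx :
    ∀ (l : List String) (P : String → Bool),
      (PySem.List.dedup (l.filter P)).Pairwise
        (fun a b => (PySem.List.index? l a).getD 0 < (PySem.List.index? l b).getD 0) := by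
  intro l
  induction l with
  | nil => intro P; simp [PySem.List.dedup]
  | cons x xs ih =>
    intro P
    by_cases hP : P x = true
    · rw [List.filter_cons_of_pos hP, dedup_cons, List.filter_filter]
      constructor
      · intro b hb
        obtain ⟨hbmem, hbP⟩ := mem_dedup_filter hb
        have hbx : b ≠ x := by
          intro h; subst h; simp at hbP
        obtain ⟨k, hk⟩ := index?_some_of_mem hbmem
        rw [PySem.List.index?_cons_self, PySem.List.index?_cons_of_ne _ (Ne.symm hbx), hk]
        simp
      · have := ih (fun a => (!a == x) && P a)
        refine this.imp_of_mem ?_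
        intro a b ha hb hab
        obtain ⟨hamem, haP⟩ := mem_dedup_filter ha
        obtain ⟨hbmem, hbP⟩ := mem_dedup_filter hb
        have hax : a ≠ x := by intro h; subst h; simp at haP
        have hbx : b ≠ x := by intro h; subst h; simp at hbP
        obtain ⟨j, hj⟩ := index?_some_of_mem hamem
        obtain ⟨k, hk⟩ := index?_some_of_mem hbmem
        rw [PySem.List.index?_cons_of_ne _ (Ne.symm hax), PySem.List.index?_cons_of_ne _ (Ne.symm hbx), hj, hk]
        rw [hj, hk] at hab
        simpa using Nat.add_lt_add_right (by simpa using hab) 1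
    · rw [List.filter_cons_of_neg hP]
      refine (ih P).imp_of_mem ?_
      intro a b ha hb hab
      obtain ⟨hamem, haP⟩ := mem_dedup_filter ha
      obtain ⟨hbmem, hbP⟩ := mem_dedup_filter hb
      have hax : a ≠ x := by intro h; subst h; exact hP haP
      have hbx : b ≠ x := by intro h; subst h; exact hP hbP
      obtain ⟨j, hj⟩ := index?_some_of_mem hamem
      obtain ⟨k, hk⟩ := index?_some_of_mem hbmem
      rw [PySem.List.index?_cons_of_ne _ (Ne.symm hax), PySem.List.index?_cons_of_ne _ (Ne.symm hbx), hj, hk]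
      rw [hj, hk] at hab
      simpa using Nat.add_lt_add_right (by simpa using hab) 1

-- ===== VERDICT =====
theorem story_touch_order_spec : Claim_equal_story_touch_order := by
  intro events stories _ _
  unfold Spec_story_touch_order story_touch_order story_touch_order_alt
  simp only []
  set names := PySem.Set.ofList (stories.map (fun story => (PySem.Dict.mk story).getD "name" "")) with hn
  set g : List (String × String) → List String := fun event =>
    (((PySem.Dict.mk event).getD "Focus items" "" |>.splitOn ",").map PySem.Str.strip).filter
      (fun v => v ≠ "") with hg
  set toks := events.flatMap g with ht
  set P : String → Bool := fun v => PySem.Set.contains names v with hP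
  have hstep : ∀ (st : List String × PySem.Set String) (item : String),
      (if PySem.Set.contains names item && !(PySem.Set.contains st.2 item) then
        (st.1 ++ [item], PySem.Set.add st.2 item) else st)
      = stepA P st item := by
    intro st item; rfl
  have hA : (events.foldl (fun st event => (g event).foldl (stepA P) st)
      (([], PySem.Set.empty) : List String × PySem.Set String)).1
      = PySem.List.dedup (toks.filter P) := by
    have hflat : events.foldl (fun st event => (g event).foldl (stepA P) st)
        (([], PySem.Set.empty) : List String × PySem.Set String)
        = (events.flatMap g).foldl (stepA P) ([], PySem.Set.empty) :=
      (List.foldl_flatMap ..).symm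
    rw [hflat, ← ht]
    rw [show (([], PySem.Set.empty) : List String × PySem.Set String)
        = ((PySem.Set.empty : PySem.Set String), (PySem.Set.empty : PySem.Set String)) from rfl]
    rw [stepA_diag]
    simp only [PySem.List.dedup_eq_ofList, PySem.Set.ofList_eq_foldl]
    rfl
  simp only [hstep]
  rw [hA]
  have hnodupL : (PySem.List.dedup (toks.filter P)).Nodup := PySem.List.nodup_dedup _
  have hnodupM : (names.filter (fun n => toks.contains n)).Nodup :=
    (PySem.Set.nodup_ofList _).filter _
  have hperm : (PySem.List.dedup (toks.filter P)).Perm (names.filter (fun n => toks.contains n)) := by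
    rw [List.perm_ext_iff_of_nodup hnodupL hnodupM]
    intro a
    simp [List.mem_filter, hP, PySem.Set.contains, and_comm]
  have hpair := pairwise_idx toks P
  exact (PySem.List.sorted_eq_of_perm_of_pairwise_lt _ _ _ hperm hpair).symm
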